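-- pv_equiv track=rewrite | github.com/itsbobdev/expense | backend/extract_rewards_history.py | description_for_cashback
-- ===== SOURCE A (Python) =====
-- def description_for_cashback(names: list[str]) -> str:
--     ordered = []
--     for preferred in ("8% CASHBACK", "OTHER CASHBACK", "UOB EVOL Card Cashback", "UOB Absolute Cashback"):
--         if preferred in names:
--             ordered.append(preferred)
--     for name in sorted(names):
--         if name not in ordered:
--             ordered.append(name)
--     return " + ".join(ordered)
-- ===== SOURCE B (Python) =====
-- def description_for_cashback(names: list[str]) -> str:
--     rank = {name: i for i, name in enumerate(
--         ("8% CASHBACK", "OTHER CASHBACK", "UOB EVOL Card Cashback", "UOB Absolute Cashback"))}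
--     return " + ".join(sorted(set(names), key=lambda n: (rank.get(n, 4), n)))
-- ===== Notes on version B (the rewrite author's own statement) =====
-- stated objective: faster
-- what changed: A builds the result in two staged appending passes (a scan of the preference tuple, then a dedup-while-scanning pass over sorted(names) with membership tests in the growing result list); B deduplicates once into a set and performs a single keyed sort with key (rank.get(n, 4), n) from an enumerated rank table, so the staged passes and the quadratic list-membership tests disappear.
import Mathlib
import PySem

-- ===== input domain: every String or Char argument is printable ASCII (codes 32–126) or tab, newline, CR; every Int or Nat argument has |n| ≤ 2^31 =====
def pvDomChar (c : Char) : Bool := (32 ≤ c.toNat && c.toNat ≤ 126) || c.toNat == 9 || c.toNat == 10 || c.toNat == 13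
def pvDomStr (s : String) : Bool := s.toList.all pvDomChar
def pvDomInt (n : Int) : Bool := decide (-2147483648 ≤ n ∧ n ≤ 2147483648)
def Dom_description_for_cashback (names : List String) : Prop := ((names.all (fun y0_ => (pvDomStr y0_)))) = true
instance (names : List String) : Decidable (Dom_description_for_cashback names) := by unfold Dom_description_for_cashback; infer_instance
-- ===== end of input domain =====

-- B replaces A's two staged appending passes (preference scan + dedup-while-scanning over sorted(names))
-- by one keyed sort of the deduplicated set with key (rank.get(n, 4), n) from an enumerated rank table
-- (objective: a single keyed sort in place of A's staged passes with list-membership tests).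


-- ===== PORT A =====
def description_for_cashback (names : List String) : String :=
  let ordered : List String :=
    ["8% CASHBACK", "OTHER CASHBACK", "UOB EVOL Card Cashback", "UOB Absolute Cashback"].foldl
      (fun acc preferred => if preferred ∈ names then acc ++ [preferred] else acc) []
  let ordered :=
    (PySem.List.sorted names (fun x => x)).foldl
      (fun acc name => if name ∉ acc then acc ++ [name] else acc) ordered
  PySem.Str.join " + " ordered

-- ===== PORT B =====
def description_for_cashback_alt (names : List String) : String :=
  let rank : PySem.Dict String Int :=
    (PySem.List.enumerate ["8% CASHBACK", "OTHER CASHBACK", "UOB EVOL Card Cashback", "UOB Absolute Cashback"] 0).foldl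
      (fun d p => PySem.Dict.insert d p.2 p.1) PySem.Dict.empty
  PySem.Str.join " + "
    (PySem.List.sorted2 (PySem.Set.ofList names)
      (fun n => PySem.Dict.getD rank n 4) (fun n => n))

-- ===== PRECONDITION & SPEC =====
def Spec_description_for_cashback (names : List String) (out : String) : Prop := out = description_for_cashback_alt names
instance (names : List String) (out : String) : Decidable (Spec_description_for_cashback names out) := by unfold Spec_description_for_cashback; infer_instance

-- ===== CLAIM (what is proved, stated in full; the proofs are below) =====
def Claim_equal_description_for_cashback : Prop := ∀ (names : List String), Dom_description_for_cashback names → Spec_description_for_cashback names (description_for_cashback names)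

-- ===== LEMMAS AND PROOFS =====

def pvPrefs : List String := ["8% CASHBACK", "OTHER CASHBACK", "UOB EVOL Card Cashback", "UOB Absolute Cashback"]

-- B's rank table (the same fold description_for_cashback_alt builds) and the key it sorts by
def pvDict : PySem.Dict String Int :=
  (PySem.List.enumerate ["8% CASHBACK", "OTHER CASHBACK", "UOB EVOL Card Cashback", "UOB Absolute Cashback"] 0).foldl
    (fun d p => PySem.Dict.insert d p.2 p.1) PySem.Dict.empty

def pvRank (n : String) : Int := PySem.Dict.getD pvDict n 4

theorem pvRank_c0 : pvRank "8% CASHBACK" = 0 := by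
  simp only [pvRank, pvDict, PySem.List.enumerate_cons, PySem.List.enumerate_nil, List.foldl_cons, List.foldl_nil]
  rw [PySem.Dict.getD_insert, if_neg (by simp), PySem.Dict.getD_insert, if_neg (by simp),
      PySem.Dict.getD_insert, if_neg (by simp), PySem.Dict.getD_insert, if_pos rfl]

theorem pvRank_c1 : pvRank "OTHER CASHBACK" = 1 := by
  simp only [pvRank, pvDict, PySem.List.enumerate_cons, PySem.List.enumerate_nil, List.foldl_cons, List.foldl_nil]
  rw [PySem.Dict.getD_insert, if_neg (by simp), PySem.Dict.getD_insert, if_neg (by simp),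
      PySem.Dict.getD_insert, if_pos rfl]
  norm_num

theorem pvRank_c2 : pvRank "UOB EVOL Card Cashback" = 2 := by
  simp only [pvRank, pvDict, PySem.List.enumerate_cons, PySem.List.enumerate_nil, List.foldl_cons, List.foldl_nil]
  rw [PySem.Dict.getD_insert, if_neg (by simp), PySem.Dict.getD_insert, if_pos rfl]
  norm_num

theorem pvRank_c3 : pvRank "UOB Absolute Cashback" = 3 := by
  simp only [pvRank, pvDict, PySem.List.enumerate_cons, PySem.List.enumerate_nil, List.foldl_cons, List.foldl_nil]
  rw [PySem.Dict.getD_insert, if_pos rfl]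
  norm_num

theorem pvRank_of_not_mem (n : String) (h : n ∉ pvPrefs) : pvRank n = 4 := by
  simp only [pvPrefs, List.mem_cons, List.not_mem_nil, or_false, not_or] at h
  obtain ⟨h1, h2, h3, h4⟩ := h
  simp only [pvRank, pvDict, PySem.List.enumerate_cons, PySem.List.enumerate_nil, List.foldl_cons, List.foldl_nil]
  rw [PySem.Dict.getD_insert, if_neg h4, PySem.Dict.getD_insert, if_neg h3,
      PySem.Dict.getD_insert, if_neg h2, PySem.Dict.getD_insert, if_neg h1, PySem.Dict.getD_empty]

theorem pvRank_lt_four_of_mem (n : String) (h : n ∈ pvPrefs) : pvRank n < 4 := by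
  simp only [pvPrefs, List.mem_cons, List.not_mem_nil, or_false] at h
  rcases h with rfl | rfl | rfl | rfl
  · rw [pvRank_c0]; norm_num
  · rw [pvRank_c1]; norm_num
  · rw [pvRank_c2]; norm_num
  · rw [pvRank_c3]; norm_num

theorem pvPrefs_nodup : pvPrefs.Nodup := by simp [pvPrefs]

theorem pvPrefs_pairwise_rank : pvPrefs.Pairwise (fun a b => pvRank a < pvRank b) := by
  simp [pvPrefs, List.pairwise_cons, pvRank_c0, pvRank_c1, pvRank_c2, pvRank_c3]

-- a Python sort on the tuple key (k1 x, k2 x) is a sort on the lexicographic product key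
theorem pv_sorted2_eq_sorted {α κ₁ κ₂ : Type} [LinearOrder κ₁] [LinearOrder κ₂]
    (xs : List α) (k1 : α → κ₁) (k2 : α → κ₂) :
    PySem.List.sorted2 xs k1 k2 false
      = PySem.List.sorted xs (fun x => toLex (k1 x, k2 x)) false := by
  rw [PySem.List.sorted_eq_foldl_insertBy]
  have hb : (fun a b => decide (k1 a < k1 b) || (!decide (k1 b < k1 a) && decide (k2 a < k2 b)))
      = (fun a b => decide ((toLex (k1 a, k2 a) : κ₁ ×ₗ κ₂) < toLex (k1 b, k2 b))) := by
    funext a b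
    by_cases h1 : k1 a < k1 b
    · simp [Prod.Lex.lt_iff, h1]
    · by_cases h2 : k1 b < k1 a
      · have hne : ¬ (k1 a = k1 b) := by
          intro e; rw [e] at h2; exact absurd h2 (lt_irrefl _)
        simp [Prod.Lex.lt_iff, h1, h2, hne]
      · have he : k1 a = k1 b := le_antisymm (not_lt.mp h2) (not_lt.mp h1)
        simp [Prod.Lex.lt_iff, he]
  simp only [PySem.List.sorted2, hb]
  simp

-- the elements a dedup-appending pass adds to an accumulator s while scanning l
def pvNewOf : List String → List String → List String
  | _, [] => []
  | s, x :: l => if x ∈ s then pvNewOf s l else x :: pvNewOf (s ++ [x]) l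

theorem pvFold_eq_newOf (l : List String) : ∀ s,
    l.foldl (fun acc name => if name ∉ acc then acc ++ [name] else acc) s = s ++ pvNewOf s l := by
  induction l with
  | nil => intro s; simp [pvNewOf]
  | cons x l ih =>
    intro s
    rw [List.foldl_cons]
    by_cases hx : x ∈ s
    · rw [if_neg (not_not_intro hx)]
      simp only [pvNewOf, if_pos hx]
      exact ih s
    · rw [if_pos hx]
      simp only [pvNewOf, if_neg hx]
      rw [ih (s ++ [x]), List.append_assoc]
      rfl

theorem pvMem_newOf (l : List String) : ∀ s x, x ∈ pvNewOf s l ↔ x ∈ l ∧ x ∉ s := by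
  induction l with
  | nil => simp [pvNewOf]
  | cons y l ih =>
    intro s x
    by_cases hy : y ∈ s
    · simp only [pvNewOf, if_pos hy, ih, List.mem_cons]
      constructor
      · rintro ⟨h1, h2⟩; exact ⟨Or.inr h1, h2⟩
      · rintro ⟨rfl | h1, h2⟩
        · exact absurd hy h2
        · exact ⟨h1, h2⟩
    · simp only [pvNewOf, if_neg hy, List.mem_cons, ih]
      constructor
      · rintro (rfl | ⟨h1, h2⟩)
        · exact ⟨Or.inl rfl, hy⟩
        · refine ⟨Or.inr h1, fun hs => h2 (by simp [hs])⟩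
      · rintro ⟨rfl | h1, h2⟩
        · exact Or.inl rfl
        · by_cases hxy : x = y
          · exact Or.inl hxy
          · exact Or.inr ⟨h1, by simp [hxy, h2]⟩

theorem pvNewOf_sublist (l : List String) : ∀ s, (pvNewOf s l).Sublist l := by
  induction l with
  | nil => intro s; simp [pvNewOf]
  | cons y l ih =>
    intro s
    by_cases hy : y ∈ s
    · simp only [pvNewOf, if_pos hy]
      exact (ih s).cons y
    · simp only [pvNewOf, if_neg hy]
      exact (ih (s ++ [y])).cons₂ y

theorem pvNewOf_nodup (l : List String) : ∀ s, (pvNewOf s l).Nodup := by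
  induction l with
  | nil => intro s; simp [pvNewOf]
  | cons y l ih =>
    intro s
    by_cases hy : y ∈ s
    · simp only [pvNewOf, if_pos hy]; exact ih s
    · simp only [pvNewOf, if_neg hy]
      refine List.nodup_cons.mpr ⟨fun hmem => ?_, ih (s ++ [y])⟩
      exact ((pvMem_newOf l (s ++ [y]) y).mp hmem).2 (by simp)

theorem pvHead_eq (names : List String) : ∀ (ps acc : List String),
    ps.foldl (fun acc p => if p ∈ names then acc ++ [p] else acc) acc
      = acc ++ ps.filter (fun p => PySem.Set.contains (PySem.Set.ofList names) p) := by
  intro ps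
  induction ps with
  | nil => simp
  | cons p ps ih =>
    intro acc
    by_cases hp : p ∈ names
    · simp [List.foldl, hp, ih]
    · simp [List.foldl, hp, ih]

-- ===== VERDICT (by name: the statement is the Claim_ definition above) =====
set_option maxHeartbeats 1000000 in
theorem description_for_cashback_spec : Claim_equal_description_for_cashback := by
  intro names _
  show description_for_cashback names = description_for_cashback_alt names
  have hB : description_for_cashback_alt names
      = PySem.Str.join " + "
          (PySem.List.sorted2 (PySem.Set.ofList names) (fun n => pvRank n) (fun n => n) false) := rfl
  have hA : description_for_cashback names
      = PySem.Str.join " + "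
          ((PySem.List.sorted names (fun x => x)).foldl
            (fun acc name => if name ∉ acc then acc ++ [name] else acc)
            (pvPrefs.foldl (fun acc preferred => if preferred ∈ names then acc ++ [preferred] else acc) [])) := rfl
  rw [hA, hB, pv_sorted2_eq_sorted, pvHead_eq names pvPrefs [], List.nil_append, pvFold_eq_newOf]
  set headA := pvPrefs.filter (fun p => PySem.Set.contains (PySem.Set.ofList names) p) with hhead
  set tailA := pvNewOf headA (PySem.List.sorted names (fun x => x)) with htail
  have hmem_head : ∀ x, x ∈ headA ↔ x ∈ pvPrefs ∧ x ∈ names := by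
    intro x
    simp [hhead, List.mem_filter, PySem.Set.contains, PySem.Set.mem_ofList]
  have hmem_tail : ∀ x, x ∈ tailA ↔ x ∈ names ∧ x ∉ headA := by
    intro x
    rw [htail, pvMem_newOf, PySem.List.mem_sorted]
  have hnotpref_tail : ∀ x, x ∈ tailA → x ∉ pvPrefs := by
    intro x hx hp
    rcases (hmem_tail x).mp hx with ⟨hn, hnh⟩
    exact hnh ((hmem_head x).mpr ⟨hp, hn⟩)
  have hnodup_head : headA.Nodup := List.Nodup.filter _ pvPrefs_nodup
  have hnodup_tail : tailA.Nodup := pvNewOf_nodup _ _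
  have hres : PySem.List.sorted (PySem.Set.ofList names)
        (fun x => (toLex (pvRank x, x) : Int ×ₗ String)) false
      = headA ++ tailA := by
    apply PySem.List.sorted_eq_of_perm_of_pairwise_lt
    · apply (List.perm_ext_iff_of_nodup ?_ ?_).mpr
      · intro a
        simp only [List.mem_append, hmem_head, hmem_tail, PySem.Set.mem_ofList]
        constructor
        · rintro (⟨_, h⟩ | ⟨h, _⟩) <;> exact h
        · intro ha
          by_cases hh : a ∈ headA
          · exact Or.inl ((hmem_head a).mp hh)
          · exact Or.inr ⟨ha, fun hc => hh ((hmem_head a).mpr hc)⟩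
      · refine List.Nodup.append hnodup_head hnodup_tail ?_
        intro a hah hat
        exact ((hmem_tail a).mp hat).2 hah
      · exact PySem.Set.nodup_ofList names
    · rw [List.pairwise_append]
      refine ⟨?_, ?_, ?_⟩
      · exact (List.Pairwise.filter _ pvPrefs_pairwise_rank).imp
          (fun h => Prod.Lex.lt_iff.mpr (Or.inl h))
      · have hlt : tailA.Pairwise (fun a b => a < b) := by
          have hle : tailA.Pairwise (fun a b => a ≤ b) :=
            List.Pairwise.sublist (htail ▸ pvNewOf_sublist _ _)
              (PySem.List.sorted_pairwise names (fun x => x))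
          exact (hle.and hnodup_tail).imp (fun h => lt_of_le_of_ne h.1 h.2)
        refine List.Pairwise.imp_of_mem ?_ hlt
        intro a b ha hb hab
        have h4a : pvRank a = 4 := pvRank_of_not_mem a (hnotpref_tail a ha)
        have h4b : pvRank b = 4 := pvRank_of_not_mem b (hnotpref_tail b hb)
        exact Prod.Lex.lt_iff.mpr (Or.inr ⟨by rw [h4a, h4b]; rfl, hab⟩)
      · intro a ha b hb
        have h4 : pvRank b = 4 := pvRank_of_not_mem b (hnotpref_tail b hb)
        have hlt4 : pvRank a < 4 := pvRank_lt_four_of_mem a ((hmem_head a).mp ha).1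
        exact Prod.Lex.lt_iff.mpr (Or.inl (by rw [h4]; exact hlt4))
  rw [hres]
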